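-- pv_equiv track=rewrite | github.com/mr-holodok/MyKNUCryptoLabs | CryptoLab2/CryptoLab2.py | EncodeBlockSinglePermutation
-- ===== SOURCE A (Python) =====
-- def EncodeBlockSinglePermutation(msg:str, cipherTable: list) -> str:
--     mod = len(msg) % len(cipherTable)
--     if mod != 0:
--         msg += (len(cipherTable) - mod) * '*'
--     encoded = list(msg)
--     for i in range(0, len(encoded)):
--         encoded[i] = msg[len(cipherTable) * (i // len(cipherTable)) + cipherTable[i % len(cipherTable)] - 1]
--     encodedStr = str()
--     for i in range(0, len(encoded)):
--         encodedStr += encoded[i]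
--     return encodedStr
-- ===== SOURCE B (Python) =====
-- def EncodeBlockSinglePermutation(msg: str, cipherTable: list) -> str:
--     L = len(cipherTable)
--     mod = len(msg) % L
--     if mod != 0:
--         msg += (L - mod) * '*'
--     n = len(msg)
--     out = [''] * n
--     for j, t in enumerate(cipherTable):
--         src = t - 1
--         for pos in range(j, n, L):
--             out[pos] = msg[src]
--             src += L
--     return ''.join(out)
-- ===== Notes on version B (the rewrite author's own statement) =====
-- stated objective: alternative
-- what changed: Replaces A's row-major gather (one flat loop computing each output character's source by div/mod arithmetic, accumulated by quadratic string concatenation) with a column-major scatter: a preallocated output buffer is filled one permutation column at a time, each column walking the message with a running source pointer incremented by the block length, so no div/mod is computed at all; joined once at the end.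
import Mathlib
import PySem

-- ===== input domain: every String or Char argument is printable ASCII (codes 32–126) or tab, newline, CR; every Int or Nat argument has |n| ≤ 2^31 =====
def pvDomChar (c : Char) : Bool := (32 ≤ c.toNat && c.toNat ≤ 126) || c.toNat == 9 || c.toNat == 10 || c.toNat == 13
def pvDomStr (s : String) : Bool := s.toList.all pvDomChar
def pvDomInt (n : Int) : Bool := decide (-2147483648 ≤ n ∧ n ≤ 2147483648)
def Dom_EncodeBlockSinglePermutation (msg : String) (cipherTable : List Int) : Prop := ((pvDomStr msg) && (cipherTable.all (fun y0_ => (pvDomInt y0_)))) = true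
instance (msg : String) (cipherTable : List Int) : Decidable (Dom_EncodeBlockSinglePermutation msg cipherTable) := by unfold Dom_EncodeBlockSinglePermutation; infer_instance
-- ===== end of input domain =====

-- B replaces A's row-major gather (flat loop, div/mod source arithmetic, quadratic '+=' string
-- accumulator) by a column-major scatter into a preallocated buffer with a running source
-- pointer, joined once (objective: alternative).

-- ===== PORT A =====
def EncodeBlockSinglePermutation (msg : String) (cipherTable : List Int) : String :=
  let L : Int := (cipherTable.length : Int)
  let md : Int := PySem.Int.mod ((msg.toList.length : Nat) : Int) L
  let m : List Char := if md ≠ 0 then msg.toList ++ List.replicate (L - md).toNat '*' else msg.toList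
  let encoded : List Char := (PySem.List.pyRange 0 ((m.length : Nat) : Int) 1).map (fun i =>
      PySem.List.pyGetD m (L * PySem.Int.floordiv i L + PySem.List.pyGetD cipherTable (PySem.Int.mod i L) 0 - 1) '*')
  String.ofList (encoded.foldl (fun acc c => acc ++ [c]) [])

-- ===== PORT B =====
-- the inner column loop of Source B: 'src = t - 1; for pos in range(j, n, L): out[pos] = msg[src]; src += L'
-- (the '*' default of pyGetD is unreachable on Pre_-admitted inputs, where every index is in range)
def pvScatterCol (m : List Char) (n L : Int) (out : List Char) (j t : Int) : List Char :=
  ((PySem.List.pyRange j n L).foldl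
    (fun (s : List Char × Int) pos => (s.1.set pos.toNat (PySem.List.pyGetD m s.2 '*'), s.2 + L))
    (out, t - 1)).1

def EncodeBlockSinglePermutation_alt (msg : String) (cipherTable : List Int) : String :=
  let L : Int := (cipherTable.length : Int)
  let md : Int := PySem.Int.mod ((msg.toList.length : Nat) : Int) L
  let m : List Char := if md ≠ 0 then msg.toList ++ List.replicate (L - md).toNat '*' else msg.toList
  let n : Int := ((m.length : Nat) : Int)
  -- Python's "[''] * n" placeholder buffer; under Pre_ every slot is overwritten, so the
  -- placeholder character is immaterial
  let out0 : List Char := List.replicate m.length ' '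
  let out : List Char := (PySem.List.enumerate cipherTable 0).foldl
      (fun acc p => pvScatterCol m n L acc p.1 p.2) out0
  String.ofList out

-- ===== PRECONDITION & SPEC =====
-- Pre_ excludes exactly the inputs on which Python A raises: an empty cipherTable
-- (ZeroDivisionError on len(msg) % len(cipherTable)) and table entries whose absolute
-- index L*k + t - 1 falls outside Python's indexable range of the padded message for
-- some block (IndexError); the bounds below are the extremal blocks k = 0 and k = last.
def Pre_EncodeBlockSinglePermutation (msg : String) (cipherTable : List Int) : Prop :=
  cipherTable ≠ [] ∧
  (msg.toList ≠ [] → ∀ t ∈ cipherTable,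
    1 - ((msg.toList.length + (cipherTable.length - msg.toList.length % cipherTable.length) % cipherTable.length : Nat) : Int) ≤ t
    ∧ t ≤ (cipherTable.length : Int))
instance (msg : String) (cipherTable : List Int) : Decidable (Pre_EncodeBlockSinglePermutation msg cipherTable) := by unfold Pre_EncodeBlockSinglePermutation; infer_instance

def pvWitness_EncodeBlockSinglePermutation : String × List Int := ("abcde", [2, 1])

def Spec_EncodeBlockSinglePermutation (msg : String) (cipherTable : List Int) (out : String) : Prop := out = EncodeBlockSinglePermutation_alt msg cipherTable
instance (msg : String) (cipherTable : List Int) (out : String) : Decidable (Spec_EncodeBlockSinglePermutation msg cipherTable out) := by unfold Spec_EncodeBlockSinglePermutation; infer_instance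

-- ===== CLAIM (what is proved, stated in full; the proofs are below) =====
def Claim_equal_EncodeBlockSinglePermutation : Prop := ∀ (msg : String) (cipherTable : List Int), Dom_EncodeBlockSinglePermutation msg cipherTable → Pre_EncodeBlockSinglePermutation msg cipherTable → Spec_EncodeBlockSinglePermutation msg cipherTable (EncodeBlockSinglePermutation msg cipherTable)

-- ===== LEMMAS AND PROOFS =====

-- the column fold over the explicit index list (List.range cnt).map (fun k => j + L*k):
-- running source pointer and slot-wise characterisation
lemma scatter_range_spec (m : List Char) (L j c : Int) (hL : 0 < L) (hj : 0 ≤ j) :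
    ∀ (cnt : Nat) (o : List Char),
      (((List.range cnt).map (fun k : Nat => j + L * k)).foldl
        (fun (s : List Char × Int) pos => (s.1.set pos.toNat (PySem.List.pyGetD m s.2 '*'), s.2 + L))
        (o, c)).2 = c + L * cnt ∧
      (((List.range cnt).map (fun k : Nat => j + L * k)).foldl
        (fun (s : List Char × Int) pos => (s.1.set pos.toNat (PySem.List.pyGetD m s.2 '*'), s.2 + L))
        (o, c)).1.length = o.length ∧
      ∀ p : Nat, p < o.length →
        (((List.range cnt).map (fun k : Nat => j + L * k)).foldl
          (fun (s : List Char × Int) pos => (s.1.set pos.toNat (PySem.List.pyGetD m s.2 '*'), s.2 + L))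
          (o, c)).1[p]? =
        if ∃ k < cnt, (p : Int) = j + L * k then some (PySem.List.pyGetD m (c + (p : Int) - j) '*')
        else o[p]? := by
  intro cnt
  induction cnt with
  | zero =>
    intro o
    refine ⟨by simp, by simp, fun p hp => ?_⟩
    simp
  | succ cnt ih =>
    intro o
    obtain ⟨ih2, ihlen, ihget⟩ := ih o
    have hsplit : (List.range (cnt + 1)).map (fun k : Nat => j + L * k)
        = (List.range cnt).map (fun k : Nat => j + L * k) ++ [j + L * cnt] := by
      rw [List.range_succ, List.map_append]; simp
    rw [hsplit, List.foldl_append]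
    simp only [List.foldl_cons, List.foldl_nil]
    refine ⟨?_, ?_, ?_⟩
    · rw [ih2]; push_cast; ring
    · rw [List.length_set, ihlen]
    · intro p hp
      rw [List.getElem?_set]
      have hjc : (0:Int) ≤ j + L * cnt := by positivity
      by_cases hpe : (p : Int) = j + L * cnt
      · have hidx : (j + L * cnt).toNat = p := by omega
        rw [if_pos hidx, if_pos (by rw [ihlen]; omega : (j + L * cnt).toNat < _)]
        have hex : ∃ k < cnt + 1, (p : Int) = j + L * k := ⟨cnt, Nat.lt_succ_self _, hpe⟩
        rw [if_pos hex, ih2]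
        have harg : c + L * cnt = c + (p : Int) - j := by omega
        rw [harg]
      · have hidx : ¬ (j + L * cnt).toNat = p := by omega
        rw [if_neg hidx, ihget p hp]
        by_cases hex : ∃ k < cnt, (p : Int) = j + L * k
        · obtain ⟨k, hk, hpk⟩ := hex
          rw [if_pos ⟨k, hk, hpk⟩, if_pos ⟨k, Nat.lt_succ_of_lt hk, hpk⟩]
        · have hex' : ¬ ∃ k < cnt + 1, (p : Int) = j + L * k := by
            rintro ⟨k, hk, hpk⟩
            rcases Nat.lt_succ_iff_lt_or_eq.mp hk with h | h
            · exact hex ⟨k, h, hpk⟩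
            · subst h; exact hpe hpk
          rw [if_neg hex, if_neg hex']

-- pyRange j n L (0 < L) characterised slot-wise
lemma scatterCol_spec (m : List Char) (L n j t : Int) (hL : 0 < L) (hj : 0 ≤ j) (o : List Char) :
    (pvScatterCol m n L o j t).length = o.length ∧
    ∀ p : Nat, p < o.length →
      (pvScatterCol m n L o j t)[p]? =
      if j ≤ (p : Int) ∧ ((p : Int) - j) % L = 0 ∧ (p : Int) < n
      then some (PySem.List.pyGetD m (t - 1 + (p : Int) - j) '*')
      else o[p]? := by
  unfold pvScatterCol
  rw [PySem.List.pyRange_of_pos _ _ hL]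
  obtain ⟨-, hlen, hget⟩ := scatter_range_spec m L j (t - 1) hL hj
    (if j < n then ((n - j + L - 1) / L).toNat else 0) o
  refine ⟨hlen, fun p hp => ?_⟩
  rw [hget p hp]
  have hiff : (∃ k < (if j < n then ((n - j + L - 1) / L).toNat else 0), (p : Int) = j + L * k)
      ↔ (j ≤ (p : Int) ∧ ((p : Int) - j) % L = 0 ∧ (p : Int) < n) := by
    by_cases hjn : j < n
    · rw [if_pos hjn]
      have hdm := Int.mul_ediv_add_emod (n - j + L - 1) L
      have hr0 := Int.emod_nonneg (n - j + L - 1) (by omega : L ≠ 0)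
      have hr1 := Int.emod_lt_of_pos (n - j + L - 1) hL
      set d : Int := (n - j + L - 1) / L with hd
      constructor
      · rintro ⟨k, hk, hpk⟩
        have hkd : (k : Int) < d := by omega
        have hk0 : (0 : Int) ≤ L * k := by positivity
        refine ⟨by omega, ?_, ?_⟩
        · have h1 : (p : Int) - j = L * k := by omega
          rw [h1]; exact Int.mul_emod_right L k
        · nlinarith [mul_nonneg (le_of_lt hL) (by omega : (0:Int) ≤ d - 1 - (k : Int))]
      · rintro ⟨hjp, hmod, hpn⟩
        obtain ⟨e, he⟩ := Int.dvd_of_emod_eq_zero hmod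
        have he0 : 0 ≤ e := by
          by_contra h
          push Not at h
          nlinarith [mul_pos hL (by omega : (0:Int) < -e)]
        have hed : e < d := by
          by_contra h
          push Not at h
          nlinarith [mul_le_mul_of_nonneg_left h (le_of_lt hL)]
        refine ⟨e.toNat, by omega, ?_⟩
        have hcast : ((e.toNat : Nat) : Int) = e := by omega
        rw [hcast]
        omega
    · rw [if_neg hjn]
      constructor
      · rintro ⟨k, hk, -⟩; omega
      · rintro ⟨hjp, -, hpn⟩; omega
  by_cases hc : j ≤ (p : Int) ∧ ((p : Int) - j) % L = 0 ∧ (p : Int) < n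
  · rw [if_pos (hiff.mpr hc), if_pos hc]
  · rw [if_neg (fun h => hc (hiff.mp h)), if_neg hc]

-- the outer enumerate fold: columns s, s+1, … fill exactly the residues s ≤ p % L < s + l.length
lemma scatter_outer_spec (m : List Char) (L : Int) (hL : 0 < L) :
    ∀ (l : List Int) (s : Nat) (o : List Char), o.length = m.length → (s : Int) + l.length ≤ L →
      ((PySem.List.enumerate l (s : Int)).foldl
        (fun acc p => pvScatterCol m ((m.length : Nat) : Int) L acc p.1 p.2) o).length = m.length ∧
      ∀ p : Nat, p < m.length →
        ((PySem.List.enumerate l (s : Int)).foldl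
          (fun acc p => pvScatterCol m ((m.length : Nat) : Int) L acc p.1 p.2) o)[p]? =
        if (s : Int) ≤ (p : Int) % L ∧ (p : Int) % L < (s : Int) + l.length
        then some (PySem.List.pyGetD m
          (PySem.List.pyGetD l ((p : Int) % L - s) 0 - 1 + (p : Int) - (p : Int) % L) '*')
        else o[p]? := by
  have hdd : ∀ d : Int, L ∣ d → -L < d → d < L → d = 0 := by
    rintro d ⟨q, hq⟩ h1 h2
    rcases lt_trichotomy q 0 with h | h | h
    · nlinarith
    · simp [hq, h]
    · nlinarith
  intro l
  induction l with
  | nil =>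
    intro s o hlen hsl
    rw [PySem.List.enumerate_nil, List.foldl_nil]
    refine ⟨hlen, fun p hp => ?_⟩
    rw [if_neg (by simp)]
  | cons t l' ih =>
    intro s o hlen hsl
    rw [PySem.List.enumerate_cons, List.foldl_cons]
    have hcastS : ((s : Int) + 1) = (((s + 1 : Nat)) : Int) := by push_cast; ring
    obtain ⟨h1len, h1get⟩ := scatterCol_spec m L ((m.length : Nat) : Int) s t hL
      (by positivity) o
    have hlen1 : (pvScatterCol m ((m.length : Nat) : Int) L o (s : Int) t).length = m.length := by
      rw [h1len, hlen]
    have hsl' : ((s + 1 : Nat) : Int) + (l'.length : Int) ≤ L := by push_cast [List.length_cons] at hsl; omega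
    obtain ⟨h2len, h2get⟩ := ih (s + 1) (pvScatterCol m ((m.length : Nat) : Int) L o (s : Int) t) hlen1 hsl'
    rw [hcastS]
    refine ⟨h2len, fun p hp => ?_⟩
    rw [h2get p hp]
    have hmod0 : 0 ≤ (p : Int) % L := Int.emod_nonneg _ (by omega)
    have hmodL : (p : Int) % L < L := Int.emod_lt_of_pos _ hL
    have hpo : p < o.length := by omega
    have hdm := Int.mul_ediv_add_emod (p : Int) L
    have hq0 : 0 ≤ (p : Int) / L := Int.ediv_nonneg (by positivity) (le_of_lt hL)
    have hLq0 : 0 ≤ L * ((p : Int) / L) := by positivity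
    by_cases hcs : (p : Int) % L = (s : Int)
    · rw [if_neg (by push Not; intro h; push_cast at h ⊢; omega)]
      rw [h1get p hpo]
      have hsub : (p : Int) - s = L * ((p : Int) / L) := by omega
      rw [if_pos ⟨by omega, by rw [hsub]; exact Int.mul_emod_right _ _, by omega⟩]
      have hidx : (p : Int) % L - (s : Int) = 0 := by omega
      rw [hidx]
      have hval : PySem.List.pyGetD (t :: l') 0 0 = t := by
        rw [PySem.List.pyGetD_of_nonneg _ _ le_rfl]
        simp
      rw [hval, hcs]
      rw [if_pos ⟨le_rfl, by push_cast [List.length_cons]; omega⟩]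
    · by_cases hgt : (s : Int) + 1 ≤ (p : Int) % L ∧ (p : Int) % L < (s : Int) + 1 + l'.length
      · rw [if_pos (by push_cast [List.length_cons]; omega)]
        rw [if_pos (by push_cast [List.length_cons]; omega)]
        have hi1 : 1 ≤ (p : Int) % L - s := by omega
        have hidx : ((p : Int) % L - (s : Int)).toNat = ((p : Int) % L - ((s : Int) + 1)).toNat + 1 := by
          omega
        have hcons : PySem.List.pyGetD (t :: l') ((p : Int) % L - s) 0
            = PySem.List.pyGetD l' ((p : Int) % L - ((s + 1 : Nat) : Int)) 0 := by
          rw [PySem.List.pyGetD_of_nonneg _ _ (by omega), PySem.List.pyGetD_of_nonneg _ _ (by push_cast; omega)]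
          rw [hidx]
          push_cast
          simp
        rw [← hcons]
      · rw [if_neg (by push Not; push Not at hgt; push_cast at hgt ⊢; omega)]
        rw [if_neg (by push Not; intro h1; push_cast [List.length_cons]; push Not at hgt; omega)]
        rw [h1get p hpo]
        rw [if_neg ?_]
        rintro ⟨hsp, hmod, hpn⟩
        apply hcs
        have hd0 : (p : Int) % L - (s : Int) = 0 := by
          refine hdd _ ?_ (by omega) (by omega)
          have h1 : ((p : Int) - s) % L = ((p : Int) % L - (s : Int) % L) % L := Int.sub_emod _ _ _
          have h2 : (s : Int) % L = (s : Int) := Int.emod_eq_of_lt (by positivity) (by push_cast [List.length_cons] at hsl; omega)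
          rw [h2] at h1
          rw [hmod] at h1
          exact Int.dvd_of_emod_eq_zero h1.symm
        omega

theorem EncodeBlockSinglePermutation_spec : Claim_equal_EncodeBlockSinglePermutation := by
  intro msg ct _ hpre
  obtain ⟨hne, -⟩ := hpre
  have hL : 0 < ct.length := List.length_pos_iff.mpr hne
  have hLi : (0 : Int) < (ct.length : Int) := by exact_mod_cast hL
  unfold Spec_EncodeBlockSinglePermutation EncodeBlockSinglePermutation EncodeBlockSinglePermutation_alt
  simp only []
  set L : Int := (ct.length : Int) with hLdef
  set md : Int := PySem.Int.mod ((msg.toList.length : Nat) : Int) L with hmd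
  set m : List Char := if md ≠ 0 then msg.toList ++ List.replicate (L - md).toNat '*' else msg.toList with hm
  rw [PySem.List.foldl_append_singleton_eq_self, List.nil_append]
  obtain ⟨hlen, hget⟩ := scatter_outer_spec m L hLi ct 0 (List.replicate m.length ' ')
    (by simp) (by rw [hLdef]; push_cast; omega)
  simp only [Nat.cast_zero] at hlen hget
  refine congrArg String.ofList ?_
  apply List.ext_getElem?
  intro p
  by_cases hp : p < m.length
  · rw [hget p hp]
    have hmod0 : 0 ≤ (p : Int) % L := Int.emod_nonneg _ (by omega)
    have hmodL : (p : Int) % L < L := Int.emod_lt_of_pos _ hLi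
    rw [if_pos ⟨hmod0, by rw [hLdef] at hmodL ⊢; omega⟩]
    rw [PySem.List.getElem?_map_pyRange_zero _ _ _ hp]
    rw [PySem.Int.floordiv_eq_ediv_of_pos hLi, PySem.Int.mod_eq_emod_of_pos hLi]
    have hdm := Int.mul_ediv_add_emod (p : Int) L
    simp only [sub_zero]
    congr 2
    omega
  · rw [List.getElem?_eq_none, List.getElem?_eq_none]
    · rw [hlen]; omega
    · rw [List.length_map, PySem.List.length_pyRange_one]
      omega
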